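-- pv_equiv track=rewrite | github.com/DimGj/NLP-Pipeline-for-Sentiment-Analysis-on-Tweets | CodeScripts/FileHandlers.py | SplitTuple
-- ===== SOURCE A (Python) =====
-- def SplitTuple(TupleArray):
--     TupleStr = []
--     TupleValues = []
--     for items in TupleArray:
--         for moreitems in items:
--             if isinstance(moreitems,str):
--                 TupleStr.append(moreitems)
--             else:
--                 TupleValues.append(moreitems)
--     return TupleStr,TupleValues
-- ===== SOURCE B (Python) =====
-- def SplitTuple(TupleArray):
--     # The tuples are (value, string) pairs, so splitting by type is just
--     # unzipping by position: no per-element isinstance classification needed.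
--     strs = [s for _, s in TupleArray]
--     vals = [n for n, _ in TupleArray]
--     return strs, vals
-- ===== Notes on version B (the rewrite author's own statement) =====
-- stated objective: simpler
-- what changed: Replaces A's nested loop that classifies every element by isinstance into two growing accumulators with a positional unzip: two independent comprehensions projecting the string and the value component of each pair.
import Mathlib
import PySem

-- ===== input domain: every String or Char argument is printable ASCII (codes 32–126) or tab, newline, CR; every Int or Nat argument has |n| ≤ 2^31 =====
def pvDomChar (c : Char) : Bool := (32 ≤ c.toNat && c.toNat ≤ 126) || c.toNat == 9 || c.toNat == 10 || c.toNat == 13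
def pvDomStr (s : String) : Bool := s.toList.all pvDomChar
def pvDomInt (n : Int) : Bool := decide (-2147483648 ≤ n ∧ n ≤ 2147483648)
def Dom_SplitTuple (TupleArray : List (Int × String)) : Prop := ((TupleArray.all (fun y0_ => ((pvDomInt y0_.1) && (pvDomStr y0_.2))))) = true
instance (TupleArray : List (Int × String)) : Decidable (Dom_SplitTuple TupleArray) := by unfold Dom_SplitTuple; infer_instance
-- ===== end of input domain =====

-- ===== PORT A =====
-- A: one classifying pass; each pair is iterated element-by-element (int then str),
-- the int goes to TupleValues (else branch), the str to TupleStr.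
def SplitTuple (TupleArray : List (Int × String)) : List String × List Int :=
  TupleArray.foldl
    (fun acc items =>
      -- inner loop over the pair: items.1 is not a str, items.2 is a str
      ((acc.1, acc.2 ++ [items.1]).1 ++ [items.2], (acc.1, acc.2 ++ [items.1]).2))
    ([], [])

-- ===== PORT B =====
-- B: positional unzip — two independent projections, no accumulator pair.
def SplitTuple_alt (TupleArray : List (Int × String)) : List String × List Int :=
  (TupleArray.map (fun p => p.2), TupleArray.map (fun p => p.1))

-- ===== PRECONDITION & SPEC =====
def Spec_SplitTuple (TupleArray : List (Int × String)) (out : List String × List Int) : Prop := out = SplitTuple_alt TupleArray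
instance (TupleArray : List (Int × String)) (out : List String × List Int) : Decidable (Spec_SplitTuple TupleArray out) := by unfold Spec_SplitTuple; infer_instance

-- ===== CLAIM (what is proved, stated in full; the proofs are below) =====
def Claim_equal_SplitTuple : Prop := ∀ (TupleArray : List (Int × String)), Dom_SplitTuple TupleArray → Spec_SplitTuple TupleArray (SplitTuple TupleArray)

-- ===== LEMMAS AND PROOFS =====

-- ===== VERDICT (by name: the statement is the Claim_ definition above) =====
lemma splitTuple_foldl (l : List (Int × String)) (acc : List String × List Int) :
    l.foldl
      (fun acc items =>
        ((acc.1, acc.2 ++ [items.1]).1 ++ [items.2], (acc.1, acc.2 ++ [items.1]).2))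
      acc
    = (acc.1 ++ l.map (fun p => p.2), acc.2 ++ l.map (fun p => p.1)) := by
  induction l generalizing acc with
  | nil => simp
  | cons h t ih => simp [List.foldl, ih]

theorem SplitTuple_spec : Claim_equal_SplitTuple := by
  intro l _
  unfold Spec_SplitTuple SplitTuple SplitTuple_alt
  simp [splitTuple_foldl]
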